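-- pv_equiv track=rewrite | github.com/pypi-data/pypi-mirror-325 | packages/formula_detection/formula_detection-0.4.0.tar.gz/formula_detection-0.4.0/formula_detection/normalisation/rewrite_historic_dutch.py | replace_uy
-- ===== SOURCE A (Python) =====
-- def replace_uy(word: str) -> str:
--     exceptions = {'Huy', 'Guy', 'Tuyl', 'Stuyling', 'celuy', 'Vauguyon', 'Uytters'}
--     if word in exceptions:
--         return word
--     if word[:2] == 'Uy':
--         if word in {'Uytrecht', 'Uytregt'}:
--             return 'Utrecht'
--         else:
--             word = 'Ui' + word[2:]
--     parts = word.split('uy')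
--     rewrite_word = ''
--     for pi, curr_part in enumerate(parts[:-1]):
--         rewrite_word += curr_part
--         if len(parts) > pi + 1 and len(parts[pi + 1]) > 0:
--             next_part = parts[pi + 1]
--             if len(curr_part) >= 3 and curr_part.endswith('app'):
--                 rewrite_word += 'uy'
--             elif len(next_part) > 0 and next_part[0] in {'r'}:
--                 rewrite_word += 'uu'
--             elif len(next_part) > 1 and next_part[:2] in {'cl'}:
--                 rewrite_word += 'uy'
--             elif next_part.startswith('k') or next_part.startswith('ck'):
--                 if len(curr_part) > 0 and curr_part[-1] in {'c', 'k', 'C', 'K'}: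
--                     rewrite_word += 'uy'
--                 else:
--                     rewrite_word += 'ui'
--             else:
--                 rewrite_word += 'ui'
--         else:
--             rewrite_word += 'ui'
--     rewrite_word += parts[-1]
--     return rewrite_word
-- ===== SOURCE B (Python) =====
-- def replace_uy(word: str) -> str:
--     exceptions = {'Huy', 'Guy', 'Tuyl', 'Stuyling', 'celuy', 'Vauguyon', 'Uytters'}
--     if word in exceptions:
--         return word
--     if word[:2] == 'Uy':
--         if word in {'Uytrecht', 'Uytregt'}:
--             return 'Utrecht'
--         word = 'Ui' + word[2:]
--     out = []
--     i = 0
--     n = len(word)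
--     while i < n:
--         if word[i:i + 2] == 'uy':
--             nxt = word[i + 2:i + 4]
--             if i + 2 == n or nxt == 'uy':
--                 out.append('ui')
--             elif i >= 3 and word[i - 3:i] == 'app':
--                 out.append('uy')
--             elif word[i + 2] == 'r':
--                 out.append('uu')
--             elif nxt == 'cl':
--                 out.append('uy')
--             elif word[i + 2] == 'k' or nxt == 'ck':
--                 if i > 0 and word[i - 1] in 'ckCK':
--                     out.append('uy')
--                 else:
--                     out.append('ui')
--             else:
--                 out.append('ui')
--             i += 2
--         else:
--             out.append(word[i])
--             i += 1
--     return ''.join(out)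
-- ===== Notes on version B (the rewrite author's own statement) =====
-- stated objective: alternative
-- what changed: B replaces A's split-on-the-digraph-and-enumerate-parts loop (which materialises the parts list and re-indexes it with parts[pi+1]) by a single left-to-right index scan over the word that copies characters and decides each replacement from a fixed-size window around the match.
import Mathlib
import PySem

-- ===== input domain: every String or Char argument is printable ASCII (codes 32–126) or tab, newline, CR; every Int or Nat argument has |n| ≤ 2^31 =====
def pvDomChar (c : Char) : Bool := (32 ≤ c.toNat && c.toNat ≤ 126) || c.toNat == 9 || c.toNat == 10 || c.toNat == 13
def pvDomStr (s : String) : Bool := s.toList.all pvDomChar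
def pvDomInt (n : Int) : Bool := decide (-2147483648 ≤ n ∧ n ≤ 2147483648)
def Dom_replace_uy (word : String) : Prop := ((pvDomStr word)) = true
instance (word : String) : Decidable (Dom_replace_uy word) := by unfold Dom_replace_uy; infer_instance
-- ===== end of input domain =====

-- B replaces A's split-on-uy-and-parts loop by a single left-to-right index scan over the
-- word (objective: alternative decomposition, one pass without materialising the parts list).

-- ===== PORT A =====
-- A's per-iteration loop body (the code inside A's `for pi, curr_part in enumerate(parts[:-1])`).
def replace_uy_body (parts : List (List Char)) (rewrite_word : List Char) (pc : Int × List Char) : List Char :=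
  let pi := pc.1
  let curr_part := pc.2
  let rewrite_word := rewrite_word ++ curr_part
  if (parts.length : Int) > pi + 1 ∧ 0 < (PySem.List.pyGetD parts (pi + 1) []).length then
    let next_part := PySem.List.pyGetD parts (pi + 1) []
    if 3 ≤ curr_part.length ∧ PySem.Chars.endswith curr_part ['a', 'p', 'p'] = true then
      rewrite_word ++ ['u', 'y']
    else if 0 < next_part.length ∧ PySem.List.pyGetD next_part 0 ' ' = 'r' then
      rewrite_word ++ ['u', 'u']
    else if 1 < next_part.length ∧ PySem.List.slice next_part none (some 2) = ['c', 'l'] then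
      rewrite_word ++ ['u', 'y']
    else if PySem.Chars.startswith next_part ['k'] || PySem.Chars.startswith next_part ['c', 'k'] then
      if 0 < curr_part.length ∧ PySem.List.pyGetD curr_part (-1) ' ' ∈ ['c', 'k', 'C', 'K'] then
        rewrite_word ++ ['u', 'y']
      else rewrite_word ++ ['u', 'i']
    else rewrite_word ++ ['u', 'i']
  else rewrite_word ++ ['u', 'i']

-- A's split-and-parts loop, transliterated on the code-point list of `word`.
def replace_uy_partsLoop (w : List Char) : List Char :=
  let parts := PySem.Chars.splitOn w ['u', 'y']
  let rewrite_word :=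
    (PySem.List.enumerate (PySem.List.slice parts none (some (-1))) 0).foldl
      (replace_uy_body parts) []
  rewrite_word ++ PySem.List.pyGetD parts (-1) []  -- parts[-1]; exact: split never returns an empty list

def replace_uy (word : String) : String :=
  if ["Huy", "Guy", "Tuyl", "Stuyling", "celuy", "Vauguyon", "Uytters"].contains word then word
  else if PySem.List.slice word.toList none (some 2) = ['U', 'y'] then
    if word = "Uytrecht" ∨ word = "Uytregt" then "Utrecht"
    else String.ofList (replace_uy_partsLoop ('U' :: 'i' :: PySem.List.slice word.toList (some 2) none))
  else String.ofList (replace_uy_partsLoop word.toList)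

-- ===== PORT B =====
-- B's single index scan (transliteration of Source B's while loop).
def replace_uy_scanLoop (w : List Char) (i : Nat) (out : List Char) : List Char :=
  if h : i < w.length then
    if PySem.List.slice w (some (i : Int)) (some ((i : Int) + 2)) = ['u', 'y'] then
      let nxt := PySem.List.slice w (some ((i : Int) + 2)) (some ((i : Int) + 4))
      let ins :=
        if i + 2 = w.length ∨ nxt = ['u', 'y'] then ['u', 'i']
        else if 3 ≤ i ∧ PySem.List.slice w (some ((i : Int) - 3)) (some (i : Int)) = ['a', 'p', 'p'] then
          ['u', 'y']
        else if PySem.List.pyGetD w ((i : Int) + 2) ' ' = 'r' then ['u', 'u']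
        else if nxt = ['c', 'l'] then ['u', 'y']
        else if PySem.List.pyGetD w ((i : Int) + 2) ' ' = 'k' ∨ nxt = ['c', 'k'] then
          if 0 < i ∧ PySem.List.pyGetD w ((i : Int) - 1) ' ' ∈ ['c', 'k', 'C', 'K'] then ['u', 'y']
          else ['u', 'i']
        else ['u', 'i']
      replace_uy_scanLoop w (i + 2) (out ++ ins)
    else
      replace_uy_scanLoop w (i + 1) (out ++ [w[i]])
  else out
termination_by w.length - i

def replace_uy_alt (word : String) : String :=
  if ["Huy", "Guy", "Tuyl", "Stuyling", "celuy", "Vauguyon", "Uytters"].contains word then word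
  else if PySem.List.slice word.toList none (some 2) = ['U', 'y'] then
    if word = "Uytrecht" ∨ word = "Uytregt" then "Utrecht"
    else String.ofList (replace_uy_scanLoop ('U' :: 'i' :: PySem.List.slice word.toList (some 2) none) 0 [])
  else String.ofList (replace_uy_scanLoop word.toList 0 [])

-- ===== PRECONDITION & SPEC =====
def Spec_replace_uy (word : String) (out : String) : Prop := out = replace_uy_alt word
instance (word : String) (out : String) : Decidable (Spec_replace_uy word out) := by unfold Spec_replace_uy; infer_instance

-- ===== CLAIM (what is proved, stated in full; the proofs are below) =====
def Claim_equal_replace_uy : Prop := ∀ (word : String), Dom_replace_uy word → Spec_replace_uy word (replace_uy word)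

-- ===== LEMMAS AND PROOFS =====

def pvSplit2 : List Char → List (List Char)
  | [] => [[]]
  | c :: t =>
    if c = 'u' ∧ t.take 1 = ['y'] then [] :: pvSplit2 t.tail
    else (pvSplit2 t).modifyHead (c :: ·)
termination_by l => l.length
decreasing_by all_goals (simp only [List.length_tail, List.length_cons]; omega)

theorem pvSplit2_ne_nil (l : List Char) : pvSplit2 l ≠ [] := by
  induction l using pvSplit2.induct with
  | case1 => simp [pvSplit2]
  | case2 c t h ih => simp [pvSplit2, h]
  | case3 c t h ih => rw [pvSplit2]; simp [h]; exact fun hh => ih (by simpa using hh)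

theorem pvModifyHead_id (l : List (List Char)) : List.modifyHead (fun x => x) l = l := by cases l <;> simp

theorem pvPrefix_uy (c : Char) (t : List Char) :
    ['u','y'].isPrefixOf (c :: t) = true ↔ (c = 'u' ∧ t.take 1 = ['y']) := by
  cases t <;> simp [List.isPrefixOf] <;> aesop

theorem pvGo_nil (f : Nat) (cur : List Char) (acc : List (List Char)) :
    PySem.Chars.splitOn.go ['u','y'] (f+1) [] cur acc = (cur.reverse :: acc).reverse := rfl

theorem pvGo_cons (f : Nat) (c : Char) (rest cur : List Char) (acc : List (List Char)) :
    PySem.Chars.splitOn.go ['u','y'] (f+1) (c :: rest) cur acc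
      = if ['u','y'].isPrefixOf (c :: rest) = true
        then PySem.Chars.splitOn.go ['u','y'] f (List.drop 2 (c :: rest)) [] (cur.reverse :: acc)
        else PySem.Chars.splitOn.go ['u','y'] f rest (c :: cur) acc := rfl

theorem pvGo_spec (fuel : Nat) (l cur : List Char) (acc : List (List Char)) (h : l.length < fuel) :
    PySem.Chars.splitOn.go ['u','y'] fuel l cur acc
      = acc.reverse ++ (pvSplit2 l).modifyHead (cur.reverse ++ ·) := by
  induction fuel generalizing l cur acc with
  | zero => omega
  | succ f ih =>
    cases l with
    | nil => rw [pvGo_nil, pvSplit2]; simp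
    | cons c rest =>
      rw [pvGo_cons]
      by_cases hp : ['u','y'].isPrefixOf (c :: rest) = true
      · rw [if_pos hp]
        rw [pvPrefix_uy] at hp
        have h2 : rest.length ≥ 1 := by
          rcases rest with _ | ⟨x, r⟩ <;> simp_all
        rw [ih _ _ _ (by simp at h ⊢; omega)]
        rw [pvSplit2]
        simp only [if_pos hp, List.reverse_cons, List.reverse_nil, List.nil_append,
          List.modifyHead_cons, List.append_assoc]
        simp [pvModifyHead_id]
      · rw [if_neg hp]
        rw [ih _ _ _ (by simp at h ⊢; omega)]
        rw [pvSplit2]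
        rw [pvPrefix_uy] at hp
        rw [if_neg hp]
        rw [List.modifyHead_modifyHead]
        have he : (fun x : List Char => (c :: cur).reverse ++ x)
            = ((fun x => cur.reverse ++ x) ∘ fun x => c :: x) := by funext x; simp
        rw [he]

theorem pvSplitOn_eq (l : List Char) : PySem.Chars.splitOn l ['u', 'y'] = pvSplit2 l := by
  rw [PySem.Chars.splitOn, pvGo_spec _ _ _ _ (by omega)]
  simp [pvModifyHead_id]

-- First segment of pvSplit2.
def pvTake : List Char → List Char
  | [] => []
  | c :: t => if c = 'u' ∧ t.take 1 = ['y'] then [] else c :: pvTake t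

theorem pvSplit2_headI (l : List Char) : (pvSplit2 l).headI = pvTake l := by
  induction l using pvSplit2.induct with
  | case1 => simp [pvSplit2, pvTake]
  | case2 c t h ih => rw [pvSplit2, pvTake]; simp [h]
  | case3 c t h ih =>
    rw [pvSplit2, pvTake, if_neg h, if_neg h]
    have := pvSplit2_ne_nil t
    rcases hs : pvSplit2 t with _ | ⟨q, r⟩
    · exact absurd hs this
    · rw [hs] at ih; simpa using ih

theorem pvTake_nil_iff (t : List Char) : pvTake t = [] ↔ (t = [] ∨ t.take 2 = ['u','y']) := by
  cases t with
  | nil => simp [pvTake]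
  | cons c t' =>
    rw [pvTake]
    rcases t' with _ | ⟨d, t''⟩ <;> split_ifs <;> simp_all

theorem pvTake_headI (t : List Char) (h : pvTake t ≠ []) : (pvTake t).headI = t.headI := by
  cases t with
  | nil => simp [pvTake] at h
  | cons c t' => rw [pvTake] at h ⊢; split_ifs at h ⊢ <;> simp_all

theorem pvTake_take1 (t : List Char) (x : Char) (hx : x ≠ 'u') :
    (pvTake t).take 1 = [x] ↔ t.take 1 = [x] := by
  cases t with
  | nil => simp [pvTake]
  | cons c t' =>
    rw [pvTake]
    split_ifs with h
    · obtain ⟨hc, _⟩ := h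
      subst hc
      simp [hx.symm]
    · simp

theorem pvTake_take2 (t : List Char) (x y : Char) (hx : x ≠ 'u') (hy : y ≠ 'u') :
    (pvTake t).take 2 = [x, y] ↔ t.take 2 = [x, y] := by
  cases t with
  | nil => simp [pvTake]
  | cons c t' =>
    rw [pvTake]
    split_ifs with h
    · constructor
      · intro hh; simp at hh
      · intro hh
        exfalso
        rcases t' with _ | ⟨d, t''⟩
        · simp at h
        · simp at h hh
          exact hx (hh.1.symm.trans h.1)
    · simp only [List.take_succ_cons, List.cons.injEq]
      exact and_congr_right fun _ => pvTake_take1 t' y hy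

theorem pvGetD_neg_one {α : Type} [Inhabited α] (l : List α) (d : α) (h : l ≠ []) :
    PySem.List.pyGetD l (-1) d = l.reverse.headI := by
  have h0 : 0 < l.length := List.length_pos_iff.mpr h
  have hc : -(l.length:Int) ≤ -1 := by omega
  have hc0 : ¬ (0:Int) ≤ -1 := by omega
  rw [PySem.List.pyGetD, PySem.List.pyGet?, PySem.List.pyIdx?]
  simp only [if_neg hc0, if_pos hc]
  have h1 : ((-(-1:Int)).toNat) = 1 := by decide
  rw [h1]
  have h2 : ((some (l.length - 1)).bind fun a => l[a]?) = l[l.length - 1]? := rfl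
  rw [h2, ← List.getLast?_eq_getElem?, ← List.head?_reverse]
  rcases hr : l.reverse with _ | ⟨a, r⟩
  · exact absurd (List.reverse_eq_nil_iff.mp hr) h
  · simp

-- A's per-match decision: the inserted replacement given the current and next part.
def pvInsA (curr next : List Char) : List Char :=
  if next ≠ [] then
    if 3 ≤ curr.length ∧ PySem.Chars.endswith curr ['a', 'p', 'p'] = true then ['u', 'y']
    else if 0 < next.length ∧ PySem.List.pyGetD next 0 ' ' = 'r' then ['u', 'u']
    else if 1 < next.length ∧ PySem.List.slice next none (some 2) = ['c', 'l'] then ['u', 'y']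
    else if PySem.Chars.startswith next ['k'] || PySem.Chars.startswith next ['c', 'k'] then
      if 0 < curr.length ∧ PySem.List.pyGetD curr (-1) ' ' ∈ ['c', 'k', 'C', 'K'] then ['u', 'y']
      else ['u', 'i']
    else ['u', 'i']
  else ['u', 'i']

-- Glue the parts back together, inserting pvInsA at each former 'uy'.
def pvG : List Char → List (List Char) → List Char
  | _, [] => []
  | _, [p] => p
  | curr, p :: q :: r => p ++ pvInsA (curr ++ p) q ++ pvG [] (q :: r)

theorem pvGetD_zero (l : List Char) (d : Char) (h : l ≠ []) :
    PySem.List.pyGetD l 0 d = l.headI := by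
  rcases l with _ | ⟨a, r⟩
  · simp at h
  · simp [PySem.List.pyGetD, PySem.List.pyGet?, PySem.List.pyIdx?]

theorem pvIsPrefixOf_iff (l1 l2 : List Char) :
    l1.isPrefixOf l2 = true ↔ l2.take l1.length = l1 := by
  rw [List.isPrefixOf_iff_prefix, List.prefix_iff_eq_take]; exact eq_comm

theorem pvEndswithApp_iff (curr : List Char) (h3 : 3 ≤ curr.length) :
    PySem.Chars.endswith curr ['a', 'p', 'p'] = true ↔ curr.reverse.take 3 = ['p', 'p', 'a'] := by
  show List.isSuffixOf _ _ = true ↔ _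
  rw [List.isSuffixOf_iff_suffix, ← List.reverse_prefix, List.prefix_iff_eq_take]
  constructor
  · intro hh; exact hh.symm ▸ rfl
  · intro hh; simpa using hh.symm

theorem pvApp_iff (curr pre : List Char) (hpre : pre = [] ∨ pre.head? = some 'y') :
    (3 ≤ (curr.reverse ++ pre).length ∧ (curr.reverse ++ pre).take 3 = ['p', 'p', 'a'])
      ↔ (3 ≤ curr.length ∧ PySem.Chars.endswith curr ['a', 'p', 'p'] = true) := by
  by_cases h3 : 3 ≤ curr.length
  · rw [List.take_append_of_le_length (by simpa using h3)]
    rw [pvEndswithApp_iff curr h3]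
    constructor
    · rintro ⟨-, hh⟩; exact ⟨h3, hh⟩
    · rintro ⟨-, hh⟩; exact ⟨by simp; omega, hh⟩
  · constructor
    · rintro ⟨hlen, htake⟩
      exfalso
      rcases hpre with rfl | hy
      · simp at hlen; omega
      · rcases pre with _ | ⟨p0, pr⟩
        · simp at hy
        · simp only [List.head?_cons, Option.some.injEq] at hy
          subst hy
          rcases curr with _ | ⟨a, _ | ⟨b, _ | ⟨c, r⟩⟩⟩ <;> simp_all
    · rintro ⟨hh, -⟩; omega

theorem pvLast_iff (curr pre : List Char) (hpre : pre = [] ∨ pre.head? = some 'y') :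
    (0 < (curr.reverse ++ pre).length ∧ (curr.reverse ++ pre).headI ∈ (['c', 'k', 'C', 'K'] : List Char))
      ↔ (0 < curr.length ∧ PySem.List.pyGetD curr (-1) ' ' ∈ (['c', 'k', 'C', 'K'] : List Char)) := by
  by_cases hc : curr = []
  · subst hc
    simp only [List.reverse_nil, List.nil_append, List.length_nil]
    rcases hpre with rfl | hy
    · simp
    · rcases pre with _ | ⟨p0, pr⟩
      · simp at hy
      · simp only [List.head?_cons, Option.some.injEq] at hy
        subst hy
        simp
  · obtain ⟨a, r, hr⟩ : ∃ a r, curr.reverse = a :: r := by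
      rcases hh : curr.reverse with _ | ⟨a, r⟩
      · exact absurd (List.reverse_eq_nil_iff.mp hh) hc
      · exact ⟨a, r, rfl⟩
    rw [pvGetD_neg_one curr ' ' hc, hr]
    have : 0 < curr.length := List.length_pos_iff.mpr hc
    simp [this]

theorem pvTake1_headI (t : List Char) (x : Char) (ht : t ≠ []) :
    t.take 1 = [x] ↔ t.headI = x := by
  rcases t with _ | ⟨a, r⟩ <;> simp_all

theorem pvIns_eq (curr pre t : List Char) (hpre : pre = [] ∨ pre.head? = some 'y') :
    (if t = [] ∨ t.take 2 = ['u', 'y'] then ['u', 'i']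
     else if 3 ≤ (curr.reverse ++ pre).length ∧ (curr.reverse ++ pre).take 3 = ['p', 'p', 'a'] then
       ['u', 'y']
     else if t.headI = 'r' then ['u', 'u']
     else if t.take 2 = ['c', 'l'] then ['u', 'y']
     else if t.headI = 'k' ∨ t.take 2 = ['c', 'k'] then
       if 0 < (curr.reverse ++ pre).length ∧ (curr.reverse ++ pre).headI ∈ (['c', 'k', 'C', 'K'] : List Char)
       then ['u', 'y'] else ['u', 'i']
     else ['u', 'i'])
    = pvInsA curr (pvTake t) := by
  by_cases h0 : t = [] ∨ t.take 2 = ['u', 'y']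
  · rw [if_pos h0, pvInsA]
    have hq : pvTake t = [] := (pvTake_nil_iff t).mpr h0
    simp [hq]
  · rw [if_neg h0]
    have hq : pvTake t ≠ [] := fun hh => h0 ((pvTake_nil_iff t).mp hh)
    have ht : t ≠ [] := fun hh => h0 (Or.inl hh)
    have hql : 0 < (pvTake t).length := List.length_pos_iff.mpr hq
    rw [pvInsA, if_pos hq]
    -- r-branch condition
    have hr : (0 < (pvTake t).length ∧ PySem.List.pyGetD (pvTake t) 0 ' ' = 'r') ↔ t.headI = 'r' := by
      rw [pvGetD_zero _ _ hq, pvTake_headI t hq]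
      simp [hql]
    -- cl-branch condition
    have hcl : (1 < (pvTake t).length ∧ PySem.List.slice (pvTake t) none (some 2) = ['c', 'l'])
        ↔ t.take 2 = ['c', 'l'] := by
      have hsl : PySem.List.slice (pvTake t) none (some 2) = (pvTake t).take 2 := by
        simp [pysem]
      rw [hsl, ← pvTake_take2 t 'c' 'l' (by decide) (by decide)]
      constructor
      · rintro ⟨-, hh⟩; exact hh
      · intro hh
        refine ⟨?_, hh⟩
        have := congrArg List.length hh
        simp at this
        omega
    -- k-branch condition
    have hk : (PySem.Chars.startswith (pvTake t) ['k'] || PySem.Chars.startswith (pvTake t) ['c', 'k']) = true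
        ↔ (t.headI = 'k' ∨ t.take 2 = ['c', 'k']) := by
      show (List.isPrefixOf _ _ || List.isPrefixOf _ _) = true ↔ _
      rw [Bool.or_eq_true, pvIsPrefixOf_iff, pvIsPrefixOf_iff]
      show (pvTake t).take 1 = ['k'] ∨ (pvTake t).take 2 = ['c','k'] ↔ _
      rw [pvTake_take1 t 'k' (by decide), pvTake_take2 t 'c' 'k' (by decide) (by decide),
        pvTake1_headI t 'k' ht]
    simp only [pvApp_iff curr pre hpre, hr, hcl, hk, pvLast_iff curr pre hpre]

-- slice windows used by the scan
theorem pvSliceWin (w : List Char) (i : Nat) :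
    PySem.List.slice w (some (i : Int)) (some ((i : Int) + 2)) = (w.drop i).take 2 := by
  have h := PySem.List.slice_natCast_add w i 2
  simpa using h

theorem pvSliceWin4 (w : List Char) (i : Nat) :
    PySem.List.slice w (some ((i : Int) + 2)) (some ((i : Int) + 4)) = (w.drop (i + 2)).take 2 := by
  have h := PySem.List.slice_natCast_add w (i + 2) 2
  have e1 : ((i + 2 : Nat) : Int) = (i : Int) + 2 := by push_cast; ring
  rw [e1] at h
  have e2 : ((i : Int) + 2) + ((2 : Nat) : Int) = (i : Int) + 4 := by push_cast; ring
  rw [e2] at h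
  exact h

theorem pvSliceBack (w : List Char) (i : Nat) (h3 : 3 ≤ i) :
    PySem.List.slice w (some ((i : Int) - 3)) (some (i : Int)) = (w.drop (i - 3)).take 3 := by
  have h := PySem.List.slice_natCast w (i - 3) i
  have e1 : ((i - 3 : Nat) : Int) = (i : Int) - 3 := by omega
  have e2 : i - (i - 3) = 3 := by omega
  rw [e1, e2] at h
  exact h

theorem pvGetD_append_right (pre t : List Char) (j : Nat) (d : Char) (h : pre.length ≤ j) :
    PySem.List.pyGetD (pre ++ t) (j : Int) d = PySem.List.pyGetD t ((j - pre.length : Nat) : Int) d := by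
  rw [PySem.List.pyGetD_natCast, PySem.List.pyGetD_natCast]
  rcases Nat.lt_or_ge j (pre ++ t).length with hlt | hge
  · rw [List.getD_eq_getElem _ _ (by simpa using hlt), List.getD_eq_getElem _ _ (by simp at hlt ⊢; omega)]
    rw [List.getElem_append_right h]
  · rw [List.getD_eq_default _ _ (by simpa using hge), List.getD_eq_default _ _ (by simp at hge ⊢; omega)]

theorem pvGetD_last (ctx rest : List Char) (d : Char) (h : ctx ≠ []) :
    PySem.List.pyGetD (ctx.reverse ++ rest) ((ctx.length - 1 : Nat) : Int) d = ctx.headI := by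
  rw [PySem.List.pyGetD_natCast]
  have hl : ctx.length - 1 < ctx.reverse.length := by
    simp only [List.length_reverse]
    have := List.length_pos_iff.mpr h
    omega
  rw [List.getD_eq_getElem _ _ (by simp at hl ⊢; omega)]
  rw [List.getElem_append_left hl]
  have h1 : ctx.reverse[ctx.length - 1]? = some (ctx.reverse[ctx.length - 1]'hl) := List.getElem?_eq_getElem hl
  have h2 : ctx.reverse[ctx.length - 1]? = ctx.head? := by
    have e : ctx.reverse.getLast? = ctx.reverse[ctx.reverse.length - 1]? := List.getLast?_eq_getElem?
    rw [List.getLast?_reverse] at e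
    simpa using e.symm
  rw [h1] at h2
  rcases ctx with _ | ⟨a, r⟩
  · simp at h
  · simp only [List.head?_cons, Option.some.injEq] at h2
    simp [h2]

theorem pvG_modifyHead (curr : List Char) (c : Char) (parts : List (List Char)) (h : parts ≠ []) :
    pvG curr (parts.modifyHead (c :: ·)) = c :: pvG (curr ++ [c]) parts := by
  rcases parts with _ | ⟨q, _ | ⟨q2, r⟩⟩
  · simp at h
  · simp [pvG]
  · show pvG curr ((c :: q) :: q2 :: r) = _
    rw [pvG, pvG]
    simp

theorem pvScan_eq (k : Nat) : ∀ (rest curr pre acc w : List Char) (i : Nat),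
    rest.length ≤ k → (pre = [] ∨ pre.head? = some 'y') →
    w = (curr.reverse ++ pre).reverse ++ rest → i = (curr.reverse ++ pre).length →
    replace_uy_scanLoop w i acc = acc ++ pvG curr (pvSplit2 rest) := by
  induction k with
  | zero =>
    intro rest curr pre acc w i hk hpre hw hi
    have hr0 : rest = [] := List.length_eq_zero_iff.mp (Nat.le_zero.mp hk)
    subst hr0
    rw [replace_uy_scanLoop, dif_neg (by subst hw hi; simp only [List.append_nil, List.length_reverse, List.length_append]; omega)]
    rw [pvSplit2]
    simp [pvG]
  | succ k ih =>
    intro rest curr pre acc w i hk hpre hw hi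
    set ctx := curr.reverse ++ pre with hctx
    have hdrop : ∀ (r' : List Char), (ctx.reverse ++ r').drop ctx.length = r' := by
      intro r'
      have := List.drop_left (l₁ := ctx.reverse) (l₂ := r')
      simpa using this
    rcases rest with _ | ⟨c, t⟩
    · rw [replace_uy_scanLoop, dif_neg (by subst hw hi; simp only [List.append_nil, List.length_reverse, List.length_append]; omega)]
      rw [pvSplit2]
      simp [pvG]
    · have hlt : i < w.length := by subst hw hi; simp
      rw [replace_uy_scanLoop, dif_pos hlt]
      have hsl : PySem.List.slice w (some (i : Int)) (some ((i : Int) + 2)) = (c :: t).take 2 := by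
        rw [pvSliceWin, hw, hi, hdrop]
      by_cases hm : (c :: t).take 2 = ['u', 'y']
      · -- a 'uy' match at position i
        rcases t with _ | ⟨d, t2⟩
        · simp at hm
        obtain ⟨hc, hd⟩ : c = 'u' ∧ d = 'y' := by simpa using hm
        subst hc hd
        rw [if_pos (by rw [hsl]; simp)]
        have hwuy : w = (ctx.reverse ++ ['u', 'y']) ++ t2 := by rw [hw]; simp
        have hnxt : PySem.List.slice w (some ((i : Int) + 2)) (some ((i : Int) + 4)) = t2.take 2 := by
          rw [pvSliceWin4, hwuy, hi]
          have hlen2 : (ctx.reverse ++ ['u', 'y']).length = ctx.length + 2 := by simp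
          rw [← hlen2, List.drop_left]
        have hwl : w.length = i + 2 + t2.length := by
          rw [hw, hi]
          simp only [List.length_append, List.length_reverse, List.length_cons]
          omega
        have hc1 : (i + 2 = w.length ∨ t2.take 2 = ['u', 'y']) ↔ (t2 = [] ∨ t2.take 2 = ['u', 'y']) := by
          have he : i + 2 = w.length ↔ t2 = [] := by
            rw [← List.length_eq_zero_iff]
            omega
          exact or_congr he Iff.rfl
        have happ : (3 ≤ i ∧ PySem.List.slice w (some ((i : Int) - 3)) (some (i : Int)) = ['a', 'p', 'p'])
            ↔ (3 ≤ (curr.reverse ++ pre).length ∧ (curr.reverse ++ pre).take 3 = ['p', 'p', 'a']) := by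
          rw [hi, ← hctx]
          by_cases h3 : 3 ≤ ctx.length
          · have hb : PySem.List.slice w (some ((ctx.length : Int) - 3)) (some (ctx.length : Int))
                = (ctx.take 3).reverse := by
              rw [pvSliceBack w ctx.length h3, hw]
              rw [List.drop_append_of_le_length (by simp only [List.length_reverse]; omega)]
              have h1 : (ctx.reverse.drop (ctx.length - 3)).length = 3 := by simp only [List.length_drop, List.length_reverse]; omega
              rw [List.take_left' h1]
              exact List.reverse_take.symm
            rw [hb]
            simp only [h3, true_and]
            simp [List.reverse_eq_iff]
          · simp [h3]
        have hget2 : PySem.List.pyGetD w ((i : Int) + 2) ' ' = t2.getD 0 ' ' := by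
          have e : ((i : Int) + 2) = ((i + 2 : Nat) : Int) := by push_cast; ring
          rw [e, hwuy, hi]
          have hp := pvGetD_append_right (ctx.reverse ++ ['u', 'y']) t2 (ctx.length + 2) ' '
            (by simp)
          have e2 : ((ctx.length + 2) - (ctx.reverse ++ ['u', 'y']).length) = 0 := by simp
          rw [e2] at hp
          rw [hp, PySem.List.pyGetD_natCast]
        have hr2 : (t2.getD 0 ' ' = 'r') ↔ t2.headI = 'r' := by cases t2 <;> simp
        have hk2 : (t2.getD 0 ' ' = 'k') ↔ t2.headI = 'k' := by cases t2 <;> simp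
        have hlast : (0 < i ∧ PySem.List.pyGetD w ((i : Int) - 1) ' ' ∈ (['c', 'k', 'C', 'K'] : List Char))
            ↔ (0 < (curr.reverse ++ pre).length ∧ (curr.reverse ++ pre).headI ∈ (['c', 'k', 'C', 'K'] : List Char)) := by
          rw [hi, ← hctx]
          by_cases h0 : ctx = []
          · rw [h0]; simp
          · have hpos : 0 < ctx.length := List.length_pos_iff.mpr h0
            have e : ((ctx.length : Int) - 1) = ((ctx.length - 1 : Nat) : Int) := by omega
            rw [e, hw, pvGetD_last _ _ _ h0]
        have hins := pvIns_eq curr pre t2 hpre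
        simp only [hnxt, hget2, hc1, happ, hr2, hk2, hlast, hins]
        have hIH := ih t2 [] ('y' :: 'u' :: ctx) (acc ++ pvInsA curr (pvTake t2)) w (i + 2)
          (by simp at hk ⊢; omega) (Or.inr rfl)
          (by rw [hwuy]; simp)
          (by rw [hi]; simp only [List.length_append, List.length_reverse, List.length_cons, List.length_nil]; omega)
        rw [hIH]
        have hsp : pvSplit2 ('u' :: 'y' :: t2) = [] :: pvSplit2 t2 := by
          rw [pvSplit2]; simp
        rw [hsp]
        obtain ⟨q, r, hqr⟩ : ∃ q r, pvSplit2 t2 = q :: r := by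
          rcases hh : pvSplit2 t2 with _ | ⟨q, r⟩
          · exact absurd hh (pvSplit2_ne_nil t2)
          · exact ⟨q, r, rfl⟩
        have hq : pvTake t2 = q := by
          have hhead := pvSplit2_headI t2
          rw [hqr] at hhead
          simpa using hhead.symm
        rw [hqr, pvG, hq]
        simp
      · -- no match: copy one character
        rw [if_neg (by rw [hsl]; exact hm)]
        have hgc : w[i]'hlt = c := by
          subst hw hi
          rw [List.getElem_append_right (by simp)]
          simp
        rw [hgc]
        have hsp : pvSplit2 (c :: t) = (pvSplit2 t).modifyHead (c :: ·) := by
          rw [pvSplit2, if_neg ?hc]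
          case hc =>
            intro hh
            apply hm
            rcases t with _ | ⟨d, t2⟩ <;> simp_all
        rw [hsp, pvG_modifyHead _ _ _ (pvSplit2_ne_nil t)]
        have hIH := ih t (curr ++ [c]) pre (acc ++ [c]) w (i + 1)
          (by simpa using hk) hpre
          (by rw [hw, hctx]; simp)
          (by rw [hi, hctx]; simp only [List.length_append, List.length_reverse, List.length_cons, List.length_nil]; omega)
        rw [hIH]
        simp

theorem pvFoldA (P : List (List Char)) : ∀ (k n : Nat) (acc : List Char), P.length - n ≤ k →
    P.drop n ≠ [] →
    (List.foldl (replace_uy_body P) acc (PySem.List.enumerate ((P.drop n).dropLast) (n : Int)))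
      ++ PySem.List.pyGetD P (-1) []
    = acc ++ pvG [] (P.drop n) := by
  intro k
  induction k with
  | zero =>
    intro n acc hk hne
    exfalso
    exact hne (List.drop_eq_nil_iff.mpr (by omega))
  | succ k ih =>
    intro n acc hk hne
    rcases hd : P.drop n with _ | ⟨p, ps⟩
    · exact absurd hd hne
    rcases ps with _ | ⟨q, r⟩
    · -- p is the last part
      simp only [List.dropLast_singleton, PySem.List.enumerate_nil, List.foldl_nil]
      have hPne : P ≠ [] := by
        intro h; rw [h] at hd; simp at hd
      rw [pvGetD_neg_one P [] hPne]
      have hPs : P = P.take n ++ [p] := by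
        conv_lhs => rw [← List.take_append_drop n P]
        rw [hd]
      have hrev : P.reverse.headI = p := by
        conv_lhs => rw [hPs]
        simp
      rw [hrev, pvG]
    · -- at least two parts remain
      have hd1 : P.drop (n + 1) = q :: r := by
        rw [← List.drop_drop, hd]
        rfl
      have hlen : n + 1 < P.length := by
        have := congrArg List.length hd1
        simp at this
        omega
      have hq : PySem.List.pyGetD P ((n : Int) + 1) [] = q := by
        have e : ((n : Int) + 1) = ((n + 1 : Nat) : Int) := by push_cast; ring
        rw [e, PySem.List.pyGetD_natCast]
        have hsome : P[n + 1]? = some q := by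
          rw [← List.head?_drop, hd1]
          rfl
        simp [List.getD_eq_getElem?_getD, hsome]
      have hbody : replace_uy_body P acc ((n : Int), p) = acc ++ p ++ pvInsA p q := by
        rw [replace_uy_body]
        simp only [hq]
        by_cases hqe : q = []
        · rw [if_neg (by simp [hqe]), pvInsA, if_neg (by simp [hqe])]
        · have h0q : 0 < q.length := List.length_pos_iff.mpr hqe
          rw [if_pos ⟨by omega, h0q⟩, pvInsA, if_pos hqe]
          split_ifs <;> rfl
      rw [List.dropLast_cons₂, PySem.List.enumerate_cons, List.foldl_cons]
      have hIH := ih (n + 1) (replace_uy_body P acc ((n : Int), p)) (by omega)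
        (by rw [hd1]; simp)
      rw [hd1] at hIH
      have e : ((n + 1 : Nat) : Int) = (n : Int) + 1 := by push_cast; ring
      rw [e] at hIH
      rw [hIH, hbody, pvG]
      simp

theorem replace_uy_core_eq (w : List Char) :
    replace_uy_partsLoop w = replace_uy_scanLoop w 0 [] := by
  have hA : replace_uy_partsLoop w = pvG [] (pvSplit2 w) := by
    rw [replace_uy_partsLoop]
    simp only [pvSplitOn_eq, PySem.List.slice_to_neg_one]
    have h := pvFoldA (pvSplit2 w) (pvSplit2 w).length 0 [] (by omega)
      (by simpa using pvSplit2_ne_nil w)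
    simp only [List.drop_zero] at h
    simpa using h
  have hB : replace_uy_scanLoop w 0 [] = [] ++ pvG [] (pvSplit2 w) :=
    pvScan_eq w.length w [] [] [] w 0 le_rfl (Or.inl rfl) (by simp) (by simp)
  rw [hA, hB]
  simp

-- ===== VERDICT (by name: the statement is the Claim_ definition above) =====
theorem replace_uy_spec : Claim_equal_replace_uy := by
  intro word _
  show replace_uy word = replace_uy_alt word
  unfold replace_uy replace_uy_alt
  by_cases h1 : ["Huy", "Guy", "Tuyl", "Stuyling", "celuy", "Vauguyon", "Uytters"].contains word
  · simp only [h1, if_true]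
  · simp only [h1]
    by_cases h2 : PySem.List.slice word.toList none (some 2) = ['U', 'y']
    · simp only [h2, if_true]
      by_cases h3 : word = "Uytrecht" ∨ word = "Uytregt"
      · simp only [h3, if_true]
      · simp only [h3, if_false]
        exact congrArg String.ofList (replace_uy_core_eq _)
    · simp only [h2, if_false]
      exact congrArg String.ofList (replace_uy_core_eq _)
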